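-- pv_equiv track=rewrite | github.com/gemsanyu/vrp3d | packing/packing.py | find_smallest_fit_box
-- ===== SOURCE A (Python) =====
-- from typing import Dict, List, Tuple
--
-- def find_smallest_fit_box(low:int,
--                          high:int,
--                          target_vol: int,
--                          volume_list: List[int]) -> int:
--     if low > high:
--         return -1
--     mid = int((low+high)/2)
--     if volume_list[mid] >= target_vol:
--         idx = find_smallest_fit_box(low, mid-1, target_vol, volume_list)
--         if idx == -1:
--             return mid
--         else:
--             return idx
--     return find_smallest_fit_box(mid+1, high, target_vol, volume_list)
-- ===== SOURCE B (Python) =====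
-- def find_smallest_fit_box(low: int,
--                           high: int,
--                           target_vol: int,
--                           volume_list) -> int:
--     res = -1
--     while low <= high:
--         mid = (low + high) // 2
--         if volume_list[mid] >= target_vol:
--             res = mid
--             high = mid - 1
--         else:
--             low = mid + 1
--     return res
-- ===== Notes on version B (the rewrite author's own statement) =====
-- stated objective: simpler
-- what changed: Replaced the recursive binary search (which threads the answer back up through '-1' checks on the recursive result) by an iterative while-loop that records the best index in an accumulator and shrinks [low, high] in place.
-- outside the precondition, e.g. on find_smallest_fit_box(-2, 1, 15, [10, 20]): A returns 1, B returns -1; on find_smallest_fit_box(0, 5, 7, [1, 2, 3]): A raises IndexError, B raises IndexError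
import Mathlib
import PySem

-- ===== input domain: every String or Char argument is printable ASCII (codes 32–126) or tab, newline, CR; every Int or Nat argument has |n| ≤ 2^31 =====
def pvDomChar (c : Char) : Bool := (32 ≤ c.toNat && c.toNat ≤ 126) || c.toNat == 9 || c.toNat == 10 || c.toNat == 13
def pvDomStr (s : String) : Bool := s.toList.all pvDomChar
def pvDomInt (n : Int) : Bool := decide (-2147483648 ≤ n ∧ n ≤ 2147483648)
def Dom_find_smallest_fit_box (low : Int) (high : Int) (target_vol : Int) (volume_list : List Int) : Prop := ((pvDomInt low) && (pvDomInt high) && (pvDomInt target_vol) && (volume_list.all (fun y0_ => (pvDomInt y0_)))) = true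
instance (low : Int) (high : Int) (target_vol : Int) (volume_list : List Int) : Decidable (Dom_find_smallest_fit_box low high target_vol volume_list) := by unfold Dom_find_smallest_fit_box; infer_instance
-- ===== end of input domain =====

-- B replaces A's recursion (answer threaded back via '-1' checks) by an iterative
-- binary search with a result accumulator; objective: simpler (O(1) space, no recursion).

-- midpoint bounds for truncating division (cited by the ports' decreasing_by)
theorem tdiv_two_mid_bounds {low high : Int} (h : low ≤ high) :
    low ≤ Int.tdiv (low + high) 2 ∧ Int.tdiv (low + high) 2 ≤ high := by
  rcases (by omega : 0 ≤ low + high ∨ low + high < 0) with hs | hs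
  · rw [Int.tdiv_eq_ediv_of_nonneg hs]; omega
  · have h2 : (-(low + high)).tdiv 2 = (-(low + high)) / 2 :=
      Int.tdiv_eq_ediv_of_nonneg (by omega)
    have h3 : Int.tdiv (low + high) 2 = -((-(low + high)) / 2) := by
      rw [← h2, Int.neg_tdiv, neg_neg]
    rw [h3]; omega

-- ===== PORT A =====
-- mid = int((low+high)/2): float true division then int() truncates toward zero; on Dom
-- |low+high| ≤ 2^32 so the float is exact and this is Int.tdiv. volume_list[mid] raises
-- outside [-len, len); Pre_ excludes those inputs, so pyGetD's default 0 is never the value used.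
def find_smallest_fit_box (low : Int) (high : Int) (target_vol : Int) (volume_list : List Int) : Int :=
  if low > high then -1
  else
    let mid := Int.tdiv (low + high) 2
    if PySem.List.pyGetD volume_list mid 0 ≥ target_vol then
      let idx := find_smallest_fit_box low (mid - 1) target_vol volume_list
      if idx = -1 then mid else idx
    else
      find_smallest_fit_box (mid + 1) high target_vol volume_list
termination_by (high + 1 - low).toNat
decreasing_by
  · have := tdiv_two_mid_bounds (show low ≤ high by omega); omega
  · have := tdiv_two_mid_bounds (show low ≤ high by omega); omega

-- ===== PORT B =====
-- the while-loop of Source B: state (low, high, res), one tail-recursive helper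
def fsfbLoop (low : Int) (high : Int) (target_vol : Int) (volume_list : List Int) (res : Int) : Int :=
  if low ≤ high then
    let mid := PySem.Int.floordiv (low + high) 2
    if PySem.List.pyGetD volume_list mid 0 ≥ target_vol then
      fsfbLoop low (mid - 1) target_vol volume_list mid
    else
      fsfbLoop (mid + 1) high target_vol volume_list res
  else res
termination_by (high + 1 - low).toNat
decreasing_by
  · have := PySem.Int.floordiv_two_mid_bounds (by assumption : low ≤ high)
    omega
  · have := PySem.Int.floordiv_two_mid_bounds (by assumption : low ≤ high)
    omega

def find_smallest_fit_box_alt (low : Int) (high : Int) (target_vol : Int) (volume_list : List Int) : Int :=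
  fsfbLoop low high target_vol volume_list (-1)

-- ===== PRECONDITION & SPEC =====
-- Pre_ restricts to well-formed search ranges (empty, or indices within the list): it excludes
-- non-empty ranges touching negative or out-of-range indices, where A raises IndexError or its
-- value is an artefact of Python's negative-index wraparound and float-truncating midpoint.
def Pre_find_smallest_fit_box (low : Int) (high : Int) (target_vol : Int) (volume_list : List Int) : Prop :=
  low > high ∨ (0 ≤ low ∧ high < volume_list.length)
instance (low : Int) (high : Int) (target_vol : Int) (volume_list : List Int) : Decidable (Pre_find_smallest_fit_box low high target_vol volume_list) := by unfold Pre_find_smallest_fit_box; infer_instance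

def pvWitness_find_smallest_fit_box : Int × Int × Int × List Int := (0, 3, 25, [10, 20, 30, 40])

def Spec_find_smallest_fit_box (low : Int) (high : Int) (target_vol : Int) (volume_list : List Int) (out : Int) : Prop := out = find_smallest_fit_box_alt low high target_vol volume_list
instance (low : Int) (high : Int) (target_vol : Int) (volume_list : List Int) (out : Int) : Decidable (Spec_find_smallest_fit_box low high target_vol volume_list out) := by unfold Spec_find_smallest_fit_box; infer_instance

-- ===== CLAIM (what is proved, stated in full; the proofs are below) =====
def Claim_equal_find_smallest_fit_box : Prop := ∀ (low : Int) (high : Int) (target_vol : Int) (volume_list : List Int), Dom_find_smallest_fit_box low high target_vol volume_list → Pre_find_smallest_fit_box low high target_vol volume_list → Spec_find_smallest_fit_box low high target_vol volume_list (find_smallest_fit_box low high target_vol volume_list)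

-- ===== LEMMAS AND PROOFS =====

-- loop invariant: the loop returns A's answer, falling back to the accumulator when A says -1
theorem fsfbLoop_eq (n : Nat) : ∀ (low high target_vol : Int) (volume_list : List Int) (res : Int),
    (high + 1 - low).toNat ≤ n → 0 ≤ low →
    fsfbLoop low high target_vol volume_list res =
      (if find_smallest_fit_box low high target_vol volume_list = -1 then res
       else find_smallest_fit_box low high target_vol volume_list) := by
  induction n with
  | zero =>
    intro low high t v res hn hlow
    have hgt : low > high := by omega
    rw [fsfbLoop, find_smallest_fit_box]
    simp [hgt, not_le.mpr hgt]
  | succ n ih =>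
    intro low high t v res hn hlow
    by_cases hle : low ≤ high
    · have hmid : PySem.Int.floordiv (low + high) 2 = Int.tdiv (low + high) 2 := by
        have h0 : (0:Int) < 2 := by omega
        rw [PySem.Int.floordiv_eq_ediv_of_pos h0,
            Int.tdiv_eq_ediv_of_nonneg (by omega : (0:Int) ≤ low + high)]
      have hb := PySem.Int.floordiv_two_mid_bounds hle
      rw [fsfbLoop, find_smallest_fit_box]
      simp only [hle, if_true, not_lt.mpr hle, if_false]
      rw [hmid] at hb ⊢
      set mid := Int.tdiv (low + high) 2 with hm
      by_cases hfit : PySem.List.pyGetD v mid 0 ≥ t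
      · simp only [hfit, if_true]
        rw [ih low (mid - 1) t v mid (by omega) hlow]
        by_cases h1 : find_smallest_fit_box low (mid - 1) t v = -1
        · simp only [h1, if_true]
          rw [if_neg (by omega : ¬ mid = -1)]
        · simp [h1]
      · simp only [hfit, if_false]
        exact ih (mid + 1) high t v res (by omega) (by omega)
    · rw [fsfbLoop, find_smallest_fit_box]
      simp [hle, show low > high by omega]

-- ===== VERDICT (by name: the statement is the Claim_ definition above) =====
theorem find_smallest_fit_box_spec : Claim_equal_find_smallest_fit_box := by
  intro low high t v _ hpre
  unfold Spec_find_smallest_fit_box find_smallest_fit_box_alt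
  rcases hpre with hgt | ⟨hlow, _⟩
  · rw [fsfbLoop, find_smallest_fit_box]
    simp [hgt, not_le.mpr hgt]
  · rw [fsfbLoop_eq ((high + 1 - low).toNat) low high t v (-1) le_rfl hlow]
    by_cases h : find_smallest_fit_box low high t v = -1 <;> simp [h]
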